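-- pv_equiv track=rewrite | github.com/kgr0831/Krafton_Jungle | Day_10/1780(종이의 개수).py | CutPaper
-- ===== SOURCE A (Python) =====
-- def CutPaper(mapPaper) :
--     if len(mapPaper) < 3 :
--         return None
--
--     length = len(mapPaper) // 3
--     result = []
--     list_1 = []
--     for i in range(length) :
--         list_Row = []
--         for j in range(length) :
--             list_Row.append(mapPaper[i][j]) # 1, 1
--         list_1.append(list_Row)
--     result.append(list_1)
--
--     list_2 = []
--     for i in range(length, length * 2) :
--         list_Row = []
--         for j in range(length) :
--             list_Row.append(mapPaper[i][j]) # 2, 1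
--         list_2.append(list_Row)
--     result.append(list_2)
--
--     list_3 = []
--     for i in range(length * 2, length * 3) :
--         list_Row = []
--         for j in range(length) :
--             list_Row.append(mapPaper[i][j]) # 3, 1
--         list_3.append(list_Row)
--     result.append(list_3)
--
--     list_4 = []
--     for i in range(length) :
--         list_Row = []
--         for j in range(length, length * 2) :
--             list_Row.append(mapPaper[i][j]) # 1, 2
--         list_4.append(list_Row)
--     result.append(list_4)
--
--     list_5 = []
--     for i in range(length, length * 2) :
--         list_Row = []
--         for j in range(length, length * 2) :
--             list_Row.append(mapPaper[i][j]) # 2, 2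
--         list_5.append(list_Row)
--     result.append(list_5)
--
--     list_6 = []
--     for i in range(length * 2, length * 3) :
--         list_Row = []
--         for j in range(length, length * 2) :
--             list_Row.append(mapPaper[i][j]) # 3, 2
--         list_6.append(list_Row)
--     result.append(list_6)
--
--     list_7 = []
--     for i in range(length) :
--         list_Row = []
--         for j in range(length * 2, length * 3) :
--             list_Row.append(mapPaper[i][j]) # 1, 3
--         list_7.append(list_Row)
--     result.append(list_7)
--
--     list_8 = []
--     for i in range(length, length * 2) :
--         list_Row = []
--         for j in range(length * 2, length * 3) :
--             list_Row.append(mapPaper[i][j]) # 2, 3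
--         list_8.append(list_Row)
--     result.append(list_8)
--
--     list_9 = []
--     for i in range(length * 2, length * 3) :
--         list_Row = []
--         for j in range(length * 2, length * 3) :
--             list_Row.append(mapPaper[i][j]) # 3, 3
--         list_9.append(list_Row)
--     result.append(list_9)
--
--     return result
-- ===== SOURCE B (Python) =====
-- def CutPaper(mapPaper):
--     if len(mapPaper) < 3:
--         return None
--     length = len(mapPaper) // 3
--     result = [[[0] * length for _ in range(length)] for _ in range(9)]
--     for i in range(length * 3):
--         for j in range(length * 3):
--             result[(j // length) * 3 + (i // length)][i % length][j % length] = mapPaper[i][j]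
--     return result
-- ===== Notes on version B (the rewrite author's own statement) =====
-- stated objective: alternative
-- what changed: Replaces A's nine separate region scans (one quadruple of nested loops per sub-block) by a single pass over the whole matrix that routes each element mapPaper[i][j] into a preallocated block (j//length)*3+(i//length) at position (i%length, j%length).
import Mathlib
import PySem

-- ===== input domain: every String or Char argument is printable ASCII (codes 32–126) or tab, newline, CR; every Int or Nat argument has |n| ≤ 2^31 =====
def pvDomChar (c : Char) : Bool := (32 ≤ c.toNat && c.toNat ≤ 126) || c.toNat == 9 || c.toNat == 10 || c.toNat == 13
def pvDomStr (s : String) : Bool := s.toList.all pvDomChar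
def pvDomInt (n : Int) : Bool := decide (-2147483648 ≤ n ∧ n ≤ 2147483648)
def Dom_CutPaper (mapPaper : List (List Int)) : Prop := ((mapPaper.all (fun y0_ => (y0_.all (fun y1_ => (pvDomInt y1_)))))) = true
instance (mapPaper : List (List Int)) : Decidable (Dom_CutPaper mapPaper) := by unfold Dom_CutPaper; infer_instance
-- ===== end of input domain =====

-- B replaces A's nine separate region scans by one pass that routes each element
-- into a preallocated sub-block (objective: alternative; same cost, different traversal).

-- mapPaper[i][j] for 0 ≤ i, j; under Pre_ the indices are in range, so getD is exact there
def pvCell (m : List (List Int)) (i j : Nat) : Int := (m.getD i []).getD j 0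

-- ===== PORT A =====
-- literal transliteration: nine region scans, each appending rows built element by element;
-- Python range(a,b) over nonnegative bounds is List.range' a (b-a), range(n) is List.range n
def CutPaper (mapPaper : List (List Int)) : Option (List (List (List Int))) :=
  if mapPaper.length < 3 then none else
  let length := mapPaper.length / 3
  let list_1 := (List.range length).foldl (fun acc i =>
      acc ++ [(List.range length).foldl (fun row j => row ++ [pvCell mapPaper i j]) []]) []
  let list_2 := (List.range' length length).foldl (fun acc i =>
      acc ++ [(List.range length).foldl (fun row j => row ++ [pvCell mapPaper i j]) []]) []
  let list_3 := (List.range' (length * 2) length).foldl (fun acc i =>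
      acc ++ [(List.range length).foldl (fun row j => row ++ [pvCell mapPaper i j]) []]) []
  let list_4 := (List.range length).foldl (fun acc i =>
      acc ++ [(List.range' length length).foldl (fun row j => row ++ [pvCell mapPaper i j]) []]) []
  let list_5 := (List.range' length length).foldl (fun acc i =>
      acc ++ [(List.range' length length).foldl (fun row j => row ++ [pvCell mapPaper i j]) []]) []
  let list_6 := (List.range' (length * 2) length).foldl (fun acc i =>
      acc ++ [(List.range' length length).foldl (fun row j => row ++ [pvCell mapPaper i j]) []]) []
  let list_7 := (List.range length).foldl (fun acc i =>
      acc ++ [(List.range' (length * 2) length).foldl (fun row j => row ++ [pvCell mapPaper i j]) []]) []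
  let list_8 := (List.range' length length).foldl (fun acc i =>
      acc ++ [(List.range' (length * 2) length).foldl (fun row j => row ++ [pvCell mapPaper i j]) []]) []
  let list_9 := (List.range' (length * 2) length).foldl (fun acc i =>
      acc ++ [(List.range' (length * 2) length).foldl (fun row j => row ++ [pvCell mapPaper i j]) []]) []
  some [list_1, list_2, list_3, list_4, list_5, list_6, list_7, list_8, list_9]

-- ===== PORT B =====
-- result[b][r][c] = v on the nested-list state (no-op when out of range, like List.set)
def pvSet3 (s : List (List (List Int))) (b r c : Nat) (v : Int) : List (List (List Int)) :=
  s.set b ((s.getD b []).set r (((s.getD b []).getD r []).set c v))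

-- literal transliteration of Source B: preallocate nine length×length zero blocks, then one
-- pass over all (i, j) routing mapPaper[i][j] into block (j/length)*3 + i/length
def CutPaper_alt (mapPaper : List (List Int)) : Option (List (List (List Int))) :=
  if mapPaper.length < 3 then none else
  let length := mapPaper.length / 3
  let init := List.replicate 9 (List.replicate length (List.replicate length (0 : Int)))
  some ((List.range (length * 3)).foldl (fun res i =>
    (List.range (length * 3)).foldl (fun res j =>
      pvSet3 res ((j / length) * 3 + i / length) (i % length) (j % length) (pvCell mapPaper i j)) res) init)

-- ===== PRECONDITION & SPEC =====
-- Pre_ excludes exactly the jagged inputs on which the Python (both A and B) raises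
-- IndexError: some scanned row (among the first 3*(n//3)) is shorter than 3*(n//3).
def Pre_CutPaper (mapPaper : List (List Int)) : Prop :=
  ∀ row ∈ mapPaper.take (3 * (mapPaper.length / 3)), 3 * (mapPaper.length / 3) ≤ row.length
instance (mapPaper : List (List Int)) : Decidable (Pre_CutPaper mapPaper) := by
  unfold Pre_CutPaper; infer_instance

def pvWitness_CutPaper : List (List Int) := [[1, 2, 3], [4, 5, 6], [7, 8, 9]]

def Spec_CutPaper (mapPaper : List (List Int)) (out : Option (List (List (List Int)))) : Prop := out = CutPaper_alt mapPaper
instance (mapPaper : List (List Int)) (out : Option (List (List (List Int)))) : Decidable (Spec_CutPaper mapPaper out) := by unfold Spec_CutPaper; infer_instance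

-- ===== CLAIM (what is proved, stated in full; the proofs are below) =====
def Claim_equal_CutPaper : Prop := ∀ (mapPaper : List (List Int)), Dom_CutPaper mapPaper → Pre_CutPaper mapPaper → Spec_CutPaper mapPaper (CutPaper mapPaper)

-- ===== LEMMAS AND PROOFS =====

-- read entry (b, r, c) of the nested-list state
def pvG (s : List (List (List Int))) (b r c : Nat) : Int := ((s.getD b []).getD r []).getD c 0

-- the state is a 9-list of L×L blocks
def pvShape (L : Nat) (s : List (List (List Int))) : Prop :=
  s.length = 9 ∧ ∀ b < 9, (s.getD b []).length = L ∧ ∀ r < L, ((s.getD b []).getD r []).length = L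

lemma pv_getD_set {α : Type} (l : List α) (i j : Nat) (a d : α) :
    (l.set i a).getD j d = if i = j ∧ j < l.length then a else l.getD j d := by
  simp only [List.getD_eq_getElem?_getD, List.getElem?_set]
  split_ifs with h1 h2 h3 h3' <;> simp_all

lemma pvShape_set3 {L : Nat} {s : List (List (List Int))} (hs : pvShape L s)
    (b r c : Nat) (v : Int) : pvShape L (pvSet3 s b r c v) := by
  obtain ⟨h9, hblk⟩ := hs
  refine ⟨by simp [pvSet3, h9], fun b' hb' => ?_⟩
  rw [pvSet3, pv_getD_set]
  split_ifs with h
  · obtain ⟨rfl, _⟩ := h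
    refine ⟨by simpa using (hblk b hb').1, fun r' hr' => ?_⟩
    rw [pv_getD_set]
    split_ifs with h2
    · obtain ⟨rfl, _⟩ := h2
      simpa using (hblk b hb').2 r hr'
    · exact (hblk b hb').2 r' hr'
  · exact hblk b' hb'

lemma pvG_set3 {L : Nat} {s : List (List (List Int))} (hs : pvShape L s)
    (b' r' c' : Nat) (hb' : b' < 9) (hr' : r' < L) (hc' : c' < L) (v : Int) (b r c : Nat) :
    pvG (pvSet3 s b' r' c' v) b r c =
      if b' = b ∧ r' = r ∧ c' = c then v else pvG s b r c := by
  obtain ⟨h9, hblk⟩ := hs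
  have hbl : (s.getD b' []).length = L := (hblk b' hb').1
  have hrl : ((s.getD b' []).getD r' []).length = L := (hblk b' hb').2 r' hr'
  rw [pvG, pvSet3, pv_getD_set]
  split_ifs with h1 h2 h2
  · obtain ⟨rfl, _⟩ := h1
    obtain ⟨_, rfl, rfl⟩ := h2
    rw [pv_getD_set, if_pos ⟨rfl, by rw [hbl]; exact hr'⟩,
      pv_getD_set, if_pos ⟨rfl, by rw [hrl]; exact hc'⟩]
  · obtain ⟨rfl, hlt⟩ := h1
    rw [pv_getD_set]
    split_ifs with h3
    · obtain ⟨rfl, _⟩ := h3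
      rw [pv_getD_set]
      split_ifs with h4
      · exact absurd ⟨rfl, rfl, h4.1⟩ h2
      · rfl
    · rfl
  · obtain ⟨rfl, rfl, rfl⟩ := h2
    exact absurd ⟨rfl, by omega⟩ h1
  · rfl

lemma pvShape_ext {L : Nat} {s t : List (List (List Int))} (hs : pvShape L s) (ht : pvShape L t)
    (h : ∀ b < 9, ∀ r < L, ∀ c < L, pvG s b r c = pvG t b r c) : s = t := by
  obtain ⟨hs9, hsb⟩ := hs
  obtain ⟨ht9, htb⟩ := ht
  apply List.ext_getElem (by omega)
  intro b hb _
  have hb9 : b < 9 := by omega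
  have hsD : s.getD b [] = s[b] := List.getD_eq_getElem s [] hb
  have htD : t.getD b [] = t[b] := List.getD_eq_getElem t [] (by omega)
  apply List.ext_getElem
  · rw [← hsD, ← htD, (hsb b hb9).1, (htb b hb9).1]
  intro r hr _
  have hrL : r < L := by rw [← hsD, (hsb b hb9).1] at hr; exact hr
  have hsD2 : s[b].getD r [] = s[b][r] := List.getD_eq_getElem s[b] [] hr
  have htD2 : t[b].getD r [] = t[b][r] := List.getD_eq_getElem t[b] [] (by
    rw [← htD, (htb b hb9).1]; exact hrL)
  apply List.ext_getElem
  · have h1 := (hsb b hb9).2 r hrL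
    have h2 := (htb b hb9).2 r hrL
    rw [hsD, hsD2] at h1
    rw [htD, htD2] at h2
    omega
  intro c hc _
  have hcL : c < L := by
    have h1 := (hsb b hb9).2 r hrL
    rw [hsD, hsD2] at h1
    omega
  have := h b hb9 r hrL c hcL
  rw [pvG, pvG, hsD, hsD2, htD, htD2,
    List.getD_eq_getElem s[b][r] 0 hc,
    List.getD_eq_getElem t[b][r] 0 (by
      have h2 := (htb b hb9).2 r hrL
      rw [htD, htD2] at h2
      omega)] at this
  exact this

lemma pv_divmod {L : Nat} (hL : 0 < L) (d c : Nat) (hc : c < L) :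
    (d * L + c) / L = d ∧ (d * L + c) % L = c := by
  constructor
  · rw [Nat.add_comm, Nat.mul_comm, Nat.add_mul_div_left _ _ hL, Nat.div_eq_of_lt hc]; omega
  · rw [Nat.add_comm, Nat.add_mul_mod_self_right, Nat.mod_eq_of_lt hc]

lemma pv_foldl_append_singleton {α β : Type} (f : α → β) :
    ∀ (l : List α) (init : List β),
      l.foldl (fun acc x => acc ++ [f x]) init = init ++ l.map f := by
  intro l
  induction l with
  | nil => simp
  | cons x xs ih => intro init; simp [ih]

lemma pv_getD_map_range' {α : Type} (f : Nat → α) (s L r : Nat) (d : α) (hr : r < L) :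
    ((List.range' s L).map f).getD r d = f (s + r) := by
  rw [List.getD_eq_getElem _ _ (by simpa using hr), List.getElem_map]
  simp [List.getElem_range']

-- inner loop of B: one row i routed across all processed columns
lemma pv_inner (m : List (List Int)) (L : Nat) (hL : 0 < L) (i : Nat) (hi : i < L * 3)
    (s : List (List (List Int))) (hs : pvShape L s) :
    ∀ t, t ≤ L * 3 →
      pvShape L ((List.range t).foldl (fun res j =>
          pvSet3 res ((j / L) * 3 + i / L) (i % L) (j % L) (pvCell m i j)) s) ∧
      ∀ b < 9, ∀ r < L, ∀ c < L,
        pvG ((List.range t).foldl (fun res j =>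
            pvSet3 res ((j / L) * 3 + i / L) (i % L) (j % L) (pvCell m i j)) s) b r c =
          if b % 3 = i / L ∧ r = i % L ∧ (b / 3) * L + c < t
          then pvCell m i ((b / 3) * L + c) else pvG s b r c := by
  intro t
  induction t with
  | zero =>
    intro _
    refine ⟨hs, fun b _ r _ c _ => ?_⟩
    simp
  | succ t ih =>
    intro ht
    obtain ⟨ihS, ihG⟩ := ih (by omega)
    rw [List.range_succ, List.foldl_append]
    have htL : t / L < 3 := (Nat.div_lt_iff_lt_mul hL).2 (by omega)
    have hiL : i / L < 3 := (Nat.div_lt_iff_lt_mul hL).2 (by omega)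
    have hB : (t / L) * 3 + i / L < 9 := by omega
    have hR : i % L < L := Nat.mod_lt _ hL
    have hC : t % L < L := Nat.mod_lt _ hL
    refine ⟨pvShape_set3 ihS _ _ _ _, fun b hb r hr c hc => ?_⟩
    simp only [List.foldl_cons, List.foldl_nil]
    rw [pvG_set3 ihS _ _ _ hB hR hC, ihG b hb r hr c hc]
    have hdm := Nat.div_add_mod t L
    by_cases hhit : (t / L) * 3 + i / L = b ∧ i % L = r ∧ t % L = c
    · obtain ⟨hb', hr', hc'⟩ := hhit
      obtain ⟨hbd, hb3⟩ := pv_divmod (by norm_num : (0 : Nat) < 3) (t / L) (i / L) hiL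
      rw [hb'] at hbd hb3
      have heq : (b / 3) * L + c = t := by rw [hbd, ← hc', Nat.mul_comm]; exact Nat.div_add_mod t L
      rw [if_pos ⟨hb', hr', hc'⟩, if_pos ⟨hb3, hr'.symm, by omega⟩, heq]
    · rw [if_neg hhit]
      by_cases hold : b % 3 = i / L ∧ r = i % L ∧ (b / 3) * L + c < t
      · rw [if_pos hold, if_pos ⟨hold.1, hold.2.1, by omega⟩]
      · rw [if_neg hold]
        by_cases hnew : b % 3 = i / L ∧ r = i % L ∧ (b / 3) * L + c < t + 1
        · exfalso
          obtain ⟨h1, h2, h3⟩ := hnew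
          have h4 : (b / 3) * L + c = t := by
            rcases Nat.lt_succ_iff_lt_or_eq.1 h3 with h | h
            · exact absurd ⟨h1, h2, h⟩ hold
            · exact h
          obtain ⟨hq, hm⟩ := pv_divmod hL (b / 3) c hc
          rw [h4] at hq hm
          exact hhit ⟨by omega, h2.symm, hm⟩
        · rw [if_neg hnew]

-- outer loop of B: rows [0, u) routed
lemma pv_outer (m : List (List Int)) (L : Nat) (hL : 0 < L) :
    ∀ u, u ≤ L * 3 →
      pvShape L ((List.range u).foldl (fun res i =>
          (List.range (L * 3)).foldl (fun res j =>
            pvSet3 res ((j / L) * 3 + i / L) (i % L) (j % L) (pvCell m i j)) res)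
          (List.replicate 9 (List.replicate L (List.replicate L (0 : Int))))) ∧
      ∀ b < 9, ∀ r < L, ∀ c < L,
        pvG ((List.range u).foldl (fun res i =>
            (List.range (L * 3)).foldl (fun res j =>
              pvSet3 res ((j / L) * 3 + i / L) (i % L) (j % L) (pvCell m i j)) res)
            (List.replicate 9 (List.replicate L (List.replicate L (0 : Int))))) b r c =
          if (b % 3) * L + r < u then pvCell m ((b % 3) * L + r) ((b / 3) * L + c) else 0 := by
  have hrep : ∀ {α : Type} (n i : Nat) (a d : α), i < n → (List.replicate n a).getD i d = a := by
    intro α n i a d h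
    rw [List.getD_eq_getElem _ _ (show i < (List.replicate n a).length by simpa using h)]
    simp
  have hinitS : pvShape L (List.replicate 9 (List.replicate L (List.replicate L (0 : Int)))) := by
    refine ⟨by simp, fun b hb => ?_⟩
    rw [hrep 9 b _ _ hb]
    exact ⟨by simp, fun r hr => by rw [hrep L r _ _ hr]; simp⟩
  intro u
  induction u with
  | zero =>
    intro _
    refine ⟨hinitS, fun b hb r hr c hc => ?_⟩
    simp only [List.range_zero, List.foldl_nil]
    rw [if_neg (Nat.not_lt_zero _)]
    rw [pvG, hrep 9 b _ _ hb, hrep L r _ _ hr, hrep L c _ _ hc]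
  | succ u ih =>
    intro hu
    obtain ⟨ihS, ihG⟩ := ih (by omega)
    rw [List.range_succ, List.foldl_append]
    simp only [List.foldl_cons, List.foldl_nil]
    obtain ⟨innS, innG⟩ := pv_inner m L hL u (by omega) _ ihS (L * 3) (le_refl _)
    refine ⟨innS, fun b hb r hr c hc => ?_⟩
    rw [innG b hb r hr c hc]
    have hb3 : b / 3 < 3 := by omega
    have hcb : (b / 3) * L + c < L * 3 := by
      have : (b / 3) * L ≤ 2 * L := Nat.mul_le_mul_right L (by omega)
      omega
    by_cases hhit : b % 3 = u / L ∧ r = u % L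
    · have heq : (b % 3) * L + r = u := by
        obtain ⟨h1, h2⟩ := hhit
        rw [h1, h2, Nat.mul_comm]
        exact Nat.div_add_mod u L
      rw [if_pos ⟨hhit.1, hhit.2, hcb⟩, if_pos (by omega), heq]
    · have hne : (b % 3) * L + r ≠ u := by
        intro h
        obtain ⟨hq, hm⟩ := pv_divmod hL (b % 3) r hr
        rw [h] at hq hm
        exact hhit ⟨hq.symm, hm.symm⟩
      rw [if_neg (by tauto), ihG b hb r hr c hc]
      by_cases hlt : (b % 3) * L + r < u
      · rw [if_pos hlt, if_pos (by omega)]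
      · rw [if_neg hlt, if_neg (by omega)]

-- A's nine blocks, in map form
lemma pvA_shape_g (m : List (List Int)) (L : Nat) :
    ∀ blocks : List (List (List Int)),
      blocks = [
        (List.range' 0 L).map (fun i => (List.range' 0 L).map (fun j => pvCell m i j)),
        (List.range' L L).map (fun i => (List.range' 0 L).map (fun j => pvCell m i j)),
        (List.range' (L * 2) L).map (fun i => (List.range' 0 L).map (fun j => pvCell m i j)),
        (List.range' 0 L).map (fun i => (List.range' L L).map (fun j => pvCell m i j)),
        (List.range' L L).map (fun i => (List.range' L L).map (fun j => pvCell m i j)),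
        (List.range' (L * 2) L).map (fun i => (List.range' L L).map (fun j => pvCell m i j)),
        (List.range' 0 L).map (fun i => (List.range' (L * 2) L).map (fun j => pvCell m i j)),
        (List.range' L L).map (fun i => (List.range' (L * 2) L).map (fun j => pvCell m i j)),
        (List.range' (L * 2) L).map (fun i => (List.range' (L * 2) L).map (fun j => pvCell m i j))] →
      pvShape L blocks ∧
      ∀ b < 9, ∀ r < L, ∀ c < L,
        pvG blocks b r c = pvCell m ((b % 3) * L + r) ((b / 3) * L + c) := by
  intro blocks hbl
  subst hbl
  constructor
  · refine ⟨by simp, fun b hb => ?_⟩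
    interval_cases b <;>
      simp only [List.getD_cons_zero, List.getD_cons_succ] <;>
      refine ⟨by simp, fun r hr => ?_⟩ <;>
      · rw [pv_getD_map_range' _ _ _ _ _ hr]; simp
  · intro b hb r hr c hc
    interval_cases b <;>
      simp only [pvG, List.getD_cons_zero, List.getD_cons_succ] <;>
      rw [pv_getD_map_range' _ _ _ _ _ hr, pv_getD_map_range' _ _ _ _ _ hc] <;>
      norm_num <;> ring_nf

-- ===== VERDICT (by name: the statement is the Claim_ definition above) =====
theorem CutPaper_spec : Claim_equal_CutPaper := by
  intro m _hDom _hPre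
  unfold Spec_CutPaper CutPaper CutPaper_alt
  by_cases hlen : m.length < 3
  · simp [hlen]
  · simp only [if_neg hlen]
    set L := m.length / 3 with hLdef
    have hL : 0 < L := by
      have : 3 ≤ m.length := by omega
      omega
    congr 1
    -- rewrite A's nine foldl scans into map form
    have hmap : ∀ (a bcol : Nat),
        (List.range' a L).foldl (fun acc i =>
          acc ++ [(List.range' bcol L).foldl (fun row j => row ++ [pvCell m i j]) []]) [] =
        (List.range' a L).map (fun i => (List.range' bcol L).map (fun j => pvCell m i j)) := by
      intro a bcol
      rw [pv_foldl_append_singleton]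
      simp only [List.nil_append]
      congr 1
      funext i
      rw [pv_foldl_append_singleton]
      simp
    have hrange : List.range L = List.range' 0 L := List.range_eq_range'
    obtain ⟨hAS, hAG⟩ := pvA_shape_g m L _ rfl
    obtain ⟨hBS, hBG⟩ := pv_outer m L hL (L * 3) (le_refl _)
    simp only [hrange, hmap]
    apply pvShape_ext hAS hBS
    intro b hb r hr c hc
    rw [hAG b hb r hr c hc, hBG b hb r hr c hc]
    have : (b % 3) * L + r < L * 3 := by
      have : (b % 3) * L ≤ 2 * L := Nat.mul_le_mul_right L (by omega)
      omega
    rw [if_pos this]
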